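-- pv_equiv track=rewrite | github.com/charles-v-phillips/leet_code_python | medium/sol_1229_Meeting_Schedule.py | simpler_implementation_of_is_overlapping
-- ===== SOURCE A (Python) =====
-- def simpler_implementation_of_is_overlapping(slots1, slots2,duration):
--     p1 = p2 = 0
--     slots1 = sorted(slots1, key=lambda x: x[0])
--     slots2 = sorted(slots2, key=lambda x: x[0])
--     while p1 < len(slots1) and p2 < len(slots2):
--         time_slot_1 = slots1[p1]
--         time_slot_2 = slots2[p2]
--         overlap_interval = min(time_slot_2[1], time_slot_1[1]) - max(time_slot_2[0], time_slot_1[0])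
--         if duration <= overlap_interval:
--             start_time = max(time_slot_2[0], time_slot_1[0])
--             return [start_time, start_time + duration]
--         if time_slot_1[1] < time_slot_2[1]:
--             p1 += 1
--         else:
--             p2 +=1
--     return []
-- ===== SOURCE B (Python) =====
-- def simpler_implementation_of_is_overlapping(slots1, slots2, duration):
--     best = None
--     for ts1 in slots1:
--         for ts2 in slots2:
--             start = max(ts1[0], ts2[0])
--             if duration <= min(ts1[1], ts2[1]) - start:
--                 if best is None or start < best:
--                     best = start
--     return [] if best is None else [best, best + duration]
-- ===== Notes on version B (the rewrite author's own statement) =====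
-- stated objective: simpler
-- what changed: Replaced the sort-plus-two-pointer scan by one nested loop over all slot pairs that tracks the minimum qualifying start (no sorting, no pointers).
-- outside the precondition, e.g. on simpler_implementation_of_is_overlapping([[0, 5]], [[0, 5], [7]], 1): A returns [0, 1], B raises IndexError
import Mathlib
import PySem

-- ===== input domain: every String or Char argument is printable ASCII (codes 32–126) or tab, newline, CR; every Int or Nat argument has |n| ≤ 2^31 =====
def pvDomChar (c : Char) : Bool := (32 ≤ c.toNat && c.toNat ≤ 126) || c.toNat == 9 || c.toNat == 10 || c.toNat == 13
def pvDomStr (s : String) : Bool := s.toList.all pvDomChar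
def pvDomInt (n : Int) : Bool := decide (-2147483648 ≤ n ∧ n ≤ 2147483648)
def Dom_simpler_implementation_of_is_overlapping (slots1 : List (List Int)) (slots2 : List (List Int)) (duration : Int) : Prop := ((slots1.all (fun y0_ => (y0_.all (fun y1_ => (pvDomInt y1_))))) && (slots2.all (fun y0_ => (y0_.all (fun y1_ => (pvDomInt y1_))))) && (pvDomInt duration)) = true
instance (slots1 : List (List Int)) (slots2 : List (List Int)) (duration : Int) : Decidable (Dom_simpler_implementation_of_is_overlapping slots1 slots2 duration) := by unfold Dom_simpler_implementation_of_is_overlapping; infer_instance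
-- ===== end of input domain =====

-- B replaces A's sort + two-pointer scan by a single nested loop over all slot pairs
-- tracking the minimum qualifying start: simpler (no sorting, no pointer bookkeeping), same results.


-- ===== PORT A =====
-- the while loop over the two pointers p1 p2; list indexing is done with getD,
-- which agrees with Python's slots[p][i] on every input Pre_ admits (indices in range there)
def pvA_loop (s1 s2 : List (List Int)) (d : Int) (p1 p2 : Nat) : List Int :=
  if _h : p1 < s1.length ∧ p2 < s2.length then
    let t1 := s1.getD p1 []
    let t2 := s2.getD p2 []
    let overlap := min (t2.getD 1 0) (t1.getD 1 0) - max (t2.getD 0 0) (t1.getD 0 0)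
    if d ≤ overlap then
      let st := max (t2.getD 0 0) (t1.getD 0 0)
      [st, st + d]
    else if t1.getD 1 0 < t2.getD 1 0 then
      pvA_loop s1 s2 d (p1 + 1) p2
    else
      pvA_loop s1 s2 d p1 (p2 + 1)
  else []
termination_by (s1.length - p1) + (s2.length - p2)
decreasing_by all_goals omega

def simpler_implementation_of_is_overlapping (slots1 : List (List Int)) (slots2 : List (List Int)) (duration : Int) : List Int :=
  pvA_loop (PySem.List.sorted slots1 (fun x => x.getD 0 0) false)
           (PySem.List.sorted slots2 (fun x => x.getD 0 0) false) duration 0 0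

-- ===== PORT B =====
-- inner loop body of Source B: update 'best' with this pair's start if the pair qualifies
def pvB_step (d : Int) (ts1 : List Int) (best : Option Int) (ts2 : List Int) : Option Int :=
  let start := max (ts1.getD 0 0) (ts2.getD 0 0)
  if d ≤ min (ts1.getD 1 0) (ts2.getD 1 0) - start then
    match best with
    | none => some start
    | some b => if start < b then some start else some b
  else best

def simpler_implementation_of_is_overlapping_alt (slots1 : List (List Int)) (slots2 : List (List Int)) (duration : Int) : List Int :=
  match slots1.foldl (fun best ts1 => slots2.foldl (pvB_step duration ts1) best) none with
  | none => []
  | some b => [b, b + duration]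

-- ===== PRECONDITION & SPEC =====
-- Pre_ excludes malformed slots (fewer than 2 endpoints), on which Python's slot[0]/slot[1]
-- indexing raises IndexError; it also excludes such slots that A's two-pointer happens to
-- return before reaching (see claim.json cites) — they are outside the task's natural domain.
-- When one side is empty, the loop body never runs and only the sort key needs slot[0],
-- so length ≥ 1 suffices there.
def Pre_simpler_implementation_of_is_overlapping (slots1 : List (List Int)) (slots2 : List (List Int)) (duration : Int) : Prop :=
  (∀ s ∈ slots1, 1 ≤ s.length) ∧ (∀ s ∈ slots2, 1 ≤ s.length) ∧
  (slots1 ≠ [] → slots2 ≠ [] → (∀ s ∈ slots1, 2 ≤ s.length) ∧ (∀ s ∈ slots2, 2 ≤ s.length))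
instance (slots1 : List (List Int)) (slots2 : List (List Int)) (duration : Int) : Decidable (Pre_simpler_implementation_of_is_overlapping slots1 slots2 duration) := by unfold Pre_simpler_implementation_of_is_overlapping; infer_instance

def pvWitness_simpler_implementation_of_is_overlapping : List (List Int) × List (List Int) × Int := ([[0, 5]], [[2, 9]], 2)

def Spec_simpler_implementation_of_is_overlapping (slots1 : List (List Int)) (slots2 : List (List Int)) (duration : Int) (out : List Int) : Prop := out = simpler_implementation_of_is_overlapping_alt slots1 slots2 duration
instance (slots1 : List (List Int)) (slots2 : List (List Int)) (duration : Int) (out : List Int) : Decidable (Spec_simpler_implementation_of_is_overlapping slots1 slots2 duration out) := by unfold Spec_simpler_implementation_of_is_overlapping; infer_instance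

-- ===== CLAIM (what is proved, stated in full; the proofs are below) =====
def Claim_equal_simpler_implementation_of_is_overlapping : Prop := ∀ (slots1 : List (List Int)) (slots2 : List (List Int)) (duration : Int), Dom_simpler_implementation_of_is_overlapping slots1 slots2 duration → Pre_simpler_implementation_of_is_overlapping slots1 slots2 duration → Spec_simpler_implementation_of_is_overlapping slots1 slots2 duration (simpler_implementation_of_is_overlapping slots1 slots2 duration)

-- ===== LEMMAS AND PROOFS =====

-- the multiset of qualifying starts: one entry max(u0,v0) for each pair (u,v) with
-- duration ≤ overlap(u,v)
def pvCands (d : Int) (xs ys : List (List Int)) : List Int :=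
  xs.flatMap (fun u => ys.filterMap (fun v =>
    if d ≤ min (u.getD 1 0) (v.getD 1 0) - max (u.getD 0 0) (v.getD 0 0)
    then some (max (u.getD 0 0) (v.getD 0 0)) else none))

def pvUpd (b : Option Int) (s : Int) : Option Int :=
  match b with
  | none => some s
  | some b => some (min b s)

def pvMinList (l : List Int) : Option Int := l.foldl pvUpd none

theorem pvUpd_lcomm : ∀ (c : Option Int) (a b : Int), pvUpd (pvUpd c a) b = pvUpd (pvUpd c b) a := by
  intro c a b
  cases c <;> simp [pvUpd, min_comm, min_left_comm]

-- B's inner fold is the min-fold over that row's qualifying starts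
theorem pvB_row (d : Int) (u : List Int) :
    ∀ (ys : List (List Int)) (best : Option Int),
      ys.foldl (pvB_step d u) best =
      (ys.filterMap (fun v =>
        if d ≤ min (u.getD 1 0) (v.getD 1 0) - max (u.getD 0 0) (v.getD 0 0)
        then some (max (u.getD 0 0) (v.getD 0 0)) else none)).foldl pvUpd best := by
  intro ys
  induction ys with
  | nil => intro best; rfl
  | cons v ys ih =>
    intro best
    by_cases h : d ≤ min (u.getD 1 0) (v.getD 1 0) - max (u.getD 0 0) (v.getD 0 0)
    · have hstep : pvB_step d u best v = pvUpd best (max (u.getD 0 0) (v.getD 0 0)) := by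
        cases best with
        | none => simp only [pvB_step, pvUpd]; rw [if_pos h]
        | some b =>
          simp only [pvB_step, pvUpd]
          rw [if_pos h]
          by_cases hb : max (u.getD 0 0) (v.getD 0 0) < b
          · rw [if_pos hb, min_eq_right (le_of_lt hb)]
          · rw [if_neg hb, min_eq_left (le_of_not_gt hb)]
      rw [List.foldl_cons, hstep,
        List.filterMap_cons_some (by rw [if_pos h]), List.foldl_cons, ih]
    · have hstep : pvB_step d u best v = best := by
        simp only [pvB_step]; rw [if_neg h]
      rw [List.foldl_cons, hstep, List.filterMap_cons_none (by rw [if_neg h]), ih]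

-- B's nested fold is the min-fold over all qualifying starts
theorem pvB_eq_minList (d : Int) :
    ∀ (xs ys : List (List Int)) (best : Option Int),
      xs.foldl (fun best u => ys.foldl (pvB_step d u) best) best =
      (pvCands d xs ys).foldl pvUpd best := by
  intro xs
  induction xs with
  | nil => intro ys best; rfl
  | cons u xs ih =>
    intro ys best
    simp only [List.foldl_cons, pvCands, List.flatMap_cons, List.foldl_append]
    rw [pvB_row, ih]
    rfl

theorem pvMinList_perm {l₁ l₂ : List Int} (h : l₁.Perm l₂) : pvMinList l₁ = pvMinList l₂ :=
  h.foldl_eq' (fun a _ b _ c => pvUpd_lcomm c a b) none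

theorem pvFoldl_upd_some (l : List Int) : ∀ b : Int, l.foldl pvUpd (some b) = some (l.foldl min b) := by
  induction l with
  | nil => intro b; rfl
  | cons x l ih => intro b; simp [List.foldl_cons, pvUpd, ih]

theorem pvMinList_eq_some_of {a : Int} {l : List Int} (hmem : a ∈ l) (hlb : ∀ x ∈ l, a ≤ x) :
    pvMinList l = some a := by
  cases l with
  | nil => cases hmem
  | cons x t =>
    have key : ∀ (t : List Int) (x : Int), (∀ y ∈ t, a ≤ y) → a ≤ x → (a = x ∨ a ∈ t) →
        t.foldl min x = a := by
      intro t
      induction t with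
      | nil =>
        intro x _ _ hmem
        rcases hmem with h | h
        · exact h.symm
        · cases h
      | cons y t ih =>
        intro x hub hax hmem
        have hay : a ≤ y := hub y (by simp)
        have hub' : ∀ z ∈ t, a ≤ z := fun z hz => hub z (by simp [hz])
        have hmin : a ≤ min x y := le_min hax hay
        rcases hmem with h | h
        · subst h
          have : min a y = a := min_eq_left hay
          exact ih (min a y) hub' hmin (Or.inl this.symm)
        · rcases List.mem_cons.mp h with h | h
          · subst h
            have : min x a = a := min_eq_right hax
            exact ih (min x a) hub' hmin (Or.inl this.symm)
          · exact ih (min x y) hub' hmin (Or.inr h)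
    have hax : a ≤ x := hlb x (by simp)
    have hmem' : a = x ∨ a ∈ t := by
      rcases List.mem_cons.mp hmem with h | h
      · exact Or.inl h
      · exact Or.inr h
    simp only [pvMinList, List.foldl_cons, pvUpd]
    rw [pvFoldl_upd_some]
    exact congrArg some (key t x (fun y hy => hlb y (by simp [hy])) hax hmem')

-- shape of a qualifying start
theorem pvMem_cands {d : Int} {xs ys : List (List Int)} {a : Int} (h : a ∈ pvCands d xs ys) :
    ∃ u ∈ xs, ∃ v ∈ ys,
      d ≤ min (u.getD 1 0) (v.getD 1 0) - max (u.getD 0 0) (v.getD 0 0) ∧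
      a = max (u.getD 0 0) (v.getD 0 0) := by
  rcases List.mem_flatMap.mp h with ⟨u, hu, hrow⟩
  rcases List.mem_filterMap.mp hrow with ⟨v, hv, hsome⟩
  by_cases hc : d ≤ min (u.getD 1 0) (v.getD 1 0) - max (u.getD 0 0) (v.getD 0 0)
  · rw [if_pos hc] at hsome
    injection hsome with h'
    exact ⟨u, hu, v, hv, hc, h'.symm⟩
  · rw [if_neg hc] at hsome
    cases hsome

-- a row whose first slot never qualifies can be removed
theorem pvCands_cons_left_of {d : Int} {x : List Int} {xs ys : List (List Int)}
    (h : ∀ v ∈ ys, ¬ d ≤ min (x.getD 1 0) (v.getD 1 0) - max (x.getD 0 0) (v.getD 0 0)) :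
    pvCands d (x :: xs) ys = pvCands d xs ys := by
  simp only [pvCands, List.flatMap_cons]
  rw [List.filterMap_eq_nil_iff.mpr (fun v hv => by rw [if_neg (h v hv)]), List.nil_append]

-- a column whose first slot never qualifies can be removed
theorem pvCands_cons_right_of {d : Int} {y : List Int} {ys : List (List Int)} :
    ∀ (xs : List (List Int)),
    (∀ u ∈ xs, ¬ d ≤ min (u.getD 1 0) (y.getD 1 0) - max (u.getD 0 0) (y.getD 0 0)) →
    pvCands d xs (y :: ys) = pvCands d xs ys := by
  intro xs
  induction xs with
  | nil => intro _; rfl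
  | cons u xs ih =>
    intro h
    simp only [pvCands, List.flatMap_cons]
    rw [List.filterMap_cons_none (by rw [if_neg (h u (by simp))])]
    have hrest := ih (fun u hu => h u (by simp [hu]))
    simp only [pvCands] at hrest
    rw [hrest]

theorem pvCands_nil_right (d : Int) : ∀ xs : List (List Int), pvCands d xs [] = [] := by
  intro xs
  simp [pvCands]

theorem pvCands_perm_right {d : Int} {ys ys' : List (List Int)} (h2 : ys.Perm ys') :
    ∀ xs : List (List Int), (pvCands d xs ys).Perm (pvCands d xs ys') := by
  intro xs
  induction xs with
  | nil => exact List.Perm.refl _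
  | cons u xs ih =>
    simp only [pvCands, List.flatMap_cons] at *
    exact (h2.filterMap _).append ih

theorem pvCands_perm {d : Int} {xs xs' ys ys' : List (List Int)}
    (h1 : xs.Perm xs') (h2 : ys.Perm ys') : (pvCands d xs ys).Perm (pvCands d xs' ys') :=
  (pvCands_perm_right h2 xs).trans (h1.flatMap (fun _ _ => List.Perm.refl _))

-- A's two-pointer loop computes the minimum qualifying start over the remaining pairs
theorem pvA_loop_spec (s1 s2 : List (List Int)) (d : Int)
    (h1 : s1.Pairwise (fun a b => a.getD 0 0 ≤ b.getD 0 0))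
    (h2 : s2.Pairwise (fun a b => a.getD 0 0 ≤ b.getD 0 0)) :
    ∀ (n p1 p2 : Nat), (s1.length - p1) + (s2.length - p2) ≤ n →
      pvA_loop s1 s2 d p1 p2 =
      match pvMinList (pvCands d (s1.drop p1) (s2.drop p2)) with
      | none => []
      | some m => [m, m + d] := by
  intro n
  induction n with
  | zero =>
    intro p1 p2 hn
    rw [pvA_loop.eq_def, dif_neg (by omega : ¬ (p1 < s1.length ∧ p2 < s2.length))]
    rw [List.drop_eq_nil_of_le (by omega : s1.length ≤ p1)]
    rfl
  | succ n ih =>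
    intro p1 p2 hn
    by_cases h : p1 < s1.length ∧ p2 < s2.length
    · obtain ⟨hp1, hp2⟩ := h
      have e1 : s1.drop p1 = s1[p1] :: s1.drop (p1 + 1) := List.drop_eq_getElem_cons hp1
      have e2 : s2.drop p2 = s2[p2] :: s2.drop (p2 + 1) := List.drop_eq_getElem_cons hp2
      have ht1 : s1.getD p1 [] = s1[p1] := by
        simp [List.getD_eq_getElem?_getD, List.getElem?_eq_getElem hp1]
      have ht2 : s2.getD p2 [] = s2[p2] := by
        simp [List.getD_eq_getElem?_getD, List.getElem?_eq_getElem hp2]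
      -- pairwise bounds: every remaining slot starts no earlier than the head slot
      have hu0 : ∀ u ∈ s1.drop p1, s1[p1].getD 0 0 ≤ u.getD 0 0 := by
        intro u hu
        rw [e1] at hu
        rcases List.mem_cons.mp hu with h | h
        · rw [h]
        · have hpw : (s1.drop p1).Pairwise (fun a b => a.getD 0 0 ≤ b.getD 0 0) := h1.drop
          rw [e1] at hpw
          exact (List.pairwise_cons.mp hpw).1 u h
      have hv0 : ∀ v ∈ s2.drop p2, s2[p2].getD 0 0 ≤ v.getD 0 0 := by
        intro v hv
        rw [e2] at hv
        rcases List.mem_cons.mp hv with h | h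
        · rw [h]
        · have hpw : (s2.drop p2).Pairwise (fun a b => a.getD 0 0 ≤ b.getD 0 0) := h2.drop
          rw [e2] at hpw
          exact (List.pairwise_cons.mp hpw).1 v h
      rw [pvA_loop.eq_def, dif_pos ⟨hp1, hp2⟩]
      simp only [ht1, ht2]
      by_cases hq : d ≤ min (s2[p2].getD 1 0) (s1[p1].getD 1 0) -
          max (s2[p2].getD 0 0) (s1[p1].getD 0 0)
      · -- the head pair qualifies: its start is the minimum qualifying start
        rw [if_pos hq]
        have hc : d ≤ min (s1[p1].getD 1 0) (s2[p2].getD 1 0) -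
            max (s1[p1].getD 0 0) (s2[p2].getD 0 0) := by omega
        have hmem : max (s1[p1].getD 0 0) (s2[p2].getD 0 0) ∈
            pvCands d (s1.drop p1) (s2.drop p2) := by
          rw [e1, e2]
          simp only [pvCands, List.flatMap_cons]
          exact List.mem_append_left _ (by
            rw [List.filterMap_cons_some (by rw [if_pos hc])]
            exact List.mem_cons_self ..)
        have hlb : ∀ a ∈ pvCands d (s1.drop p1) (s2.drop p2),
            max (s1[p1].getD 0 0) (s2[p2].getD 0 0) ≤ a := by
          intro a ha
          rcases pvMem_cands ha with ⟨u, hu, v, hv, _, rfl⟩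
          exact max_le_max (hu0 u hu) (hv0 v hv)
        rw [pvMinList_eq_some_of hmem hlb]
        have : max (s2[p2].getD 0 0) (s1[p1].getD 0 0) =
            max (s1[p1].getD 0 0) (s2[p2].getD 0 0) := max_comm _ _
        rw [this]
      · rw [if_neg hq]
        by_cases hlt : s1[p1].getD 1 0 < s2[p2].getD 1 0
        · -- advance p1: the dropped row has no qualifying pairs
          rw [if_pos hlt]
          have hrow : ∀ v ∈ s2.drop p2, ¬ d ≤ min (s1[p1].getD 1 0) (v.getD 1 0) -
              max (s1[p1].getD 0 0) (v.getD 0 0) := by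
            intro v hv
            have := hv0 v hv
            omega
          have hc2 : pvCands d (s1.drop p1) (s2.drop p2) =
              pvCands d (s1.drop (p1 + 1)) (s2.drop p2) := by
            rw [e1]
            exact pvCands_cons_left_of hrow
          rw [hc2]
          exact ih (p1 + 1) p2 (by omega)
        · -- advance p2: the dropped column has no qualifying pairs
          rw [if_neg hlt]
          have hcol : ∀ u ∈ s1.drop p1, ¬ d ≤ min (u.getD 1 0) (s2[p2].getD 1 0) -
              max (u.getD 0 0) (s2[p2].getD 0 0) := by
            intro u hu
            have := hu0 u hu
            omega
          have hc2 : pvCands d (s1.drop p1) (s2.drop p2) =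
              pvCands d (s1.drop p1) (s2.drop (p2 + 1)) := by
            rw [e2]
            exact pvCands_cons_right_of _ hcol
          rw [hc2]
          exact ih p1 (p2 + 1) (by omega)
    · rw [pvA_loop.eq_def, dif_neg h]
      rcases Nat.lt_or_ge p1 s1.length with hp1 | hp1
      · rcases Nat.lt_or_ge p2 s2.length with hp2 | hp2
        · exact absurd ⟨hp1, hp2⟩ h
        · rw [List.drop_eq_nil_of_le hp2, pvCands_nil_right]
          rfl
      · rw [List.drop_eq_nil_of_le hp1]
        rfl

-- ===== VERDICT (by name: the statement is the Claim_ definition above) =====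
theorem simpler_implementation_of_is_overlapping_spec : Claim_equal_simpler_implementation_of_is_overlapping := by
  intro slots1 slots2 d _hdom _hpre
  unfold Spec_simpler_implementation_of_is_overlapping
  unfold simpler_implementation_of_is_overlapping simpler_implementation_of_is_overlapping_alt
  have hA := pvA_loop_spec (PySem.List.sorted slots1 (fun x => x.getD 0 0) false)
    (PySem.List.sorted slots2 (fun x => x.getD 0 0) false) d
    (PySem.List.sorted_pairwise slots1 (fun x => x.getD 0 0))
    (PySem.List.sorted_pairwise slots2 (fun x => x.getD 0 0))
    ((PySem.List.sorted slots1 (fun x => x.getD 0 0) false).length +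
     (PySem.List.sorted slots2 (fun x => x.getD 0 0) false).length) 0 0 (by omega)
  simp only [List.drop_zero] at hA
  rw [hA, pvB_eq_minList]
  rw [show ∀ l : List Int, l.foldl pvUpd none = pvMinList l from fun _ => rfl]
  rw [pvMinList_perm (pvCands_perm (PySem.List.sorted_perm slots1 _ _) (PySem.List.sorted_perm slots2 _ _))]
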